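-- pv_equiv track=rewrite | github.com/bewarren/advent_of_code_24 | day_fourteen/part_two.py | find_line_with_stars
-- ===== SOURCE A (Python) =====
-- def find_line_with_stars(grid, min_stars=7):
--     """Find a line with more than 'min_stars' consecutive '*' characters."""
--     for row_index, row in enumerate(grid):
--         consecutive_stars = 0
--         for char in row:
--             if char == '*':
--                 consecutive_stars += 1
--                 if consecutive_stars > min_stars:
--                     return row_index, row  # Return the line index and content
--             else:
--                 consecutive_stars = 0
--     return None, None
-- ===== SOURCE B (Python) =====
-- def find_line_with_stars(grid, min_stars=7):
--     """Find a line with more than 'min_stars' consecutive '*' characters."""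
--     need = max(min_stars + 1, 1)
--     for row_index, row in enumerate(grid):
--         if len(row) >= need and '*' * need in row:
--             return row_index, row
--     return None, None
-- ===== Notes on version B (the rewrite author's own statement) =====
-- stated objective: idiomatic
-- what changed: The hand-written consecutive-star counter inner loop is replaced by building the needle '*' * max(min_stars+1, 1) and testing per row 'len(row) >= need and needle in row', matching A exactly including negative min_stars (any single '*' suffices).
import Mathlib
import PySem

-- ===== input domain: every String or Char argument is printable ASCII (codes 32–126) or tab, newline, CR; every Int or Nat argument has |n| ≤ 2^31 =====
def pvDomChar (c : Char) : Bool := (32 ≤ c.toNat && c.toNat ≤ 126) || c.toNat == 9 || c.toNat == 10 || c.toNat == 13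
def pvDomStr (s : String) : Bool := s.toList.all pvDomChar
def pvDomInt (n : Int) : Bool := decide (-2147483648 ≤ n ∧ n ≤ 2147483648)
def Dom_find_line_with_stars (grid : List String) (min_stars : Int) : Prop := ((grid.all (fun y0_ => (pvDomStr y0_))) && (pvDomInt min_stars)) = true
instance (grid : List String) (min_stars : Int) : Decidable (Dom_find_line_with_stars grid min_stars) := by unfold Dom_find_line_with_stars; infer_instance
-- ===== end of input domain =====

-- B replaces A's consecutive-star counter inner loop by one substring test per row (idiomatic, same cost).

-- ===== PORT A =====
-- inner loop of A: walk the row keeping the consecutive-star counter; true = 'return' fires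
def pvInnerA (min_stars : Int) : List Char → Int → Bool
  | [], _ => false
  | ch :: rest, c =>
    if ch = '*' then
      if c + 1 > min_stars then true else pvInnerA min_stars rest (c + 1)
    else pvInnerA min_stars rest 0

-- outer loop of A: enumerate(grid), first row whose inner loop returns
def pvRowsA (min_stars : Int) : Int → List String → Option Int × Option String
  | _, [] => (none, none)
  | i, row :: rest =>
    if pvInnerA min_stars row.toList 0 then (some i, some row)
    else pvRowsA min_stars (i + 1) rest

def find_line_with_stars (grid : List String) (min_stars : Int) : Option Int × Option String :=
  pvRowsA min_stars 0 grid

-- ===== PORT B =====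
-- outer loop of B: first row long enough that contains the needle as a substring
-- (nested ifs = Python's short-circuit 'and': the needle is only built when the row is long enough)
def pvRowsB (need : Int) : Int → List String → Option Int × Option String
  | _, [] => (none, none)
  | i, row :: rest =>
    if decide (need ≤ PySem.Str.len row) then
      if PySem.Chars.isIn (PySem.List.pyRepeat ['*'] need) row.toList then (some i, some row)
      else pvRowsB need (i + 1) rest
    else pvRowsB need (i + 1) rest

def find_line_with_stars_alt (grid : List String) (min_stars : Int) : Option Int × Option String :=
  let need := max (min_stars + 1) 1
  pvRowsB need 0 grid

-- ===== PRECONDITION & SPEC =====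
def Spec_find_line_with_stars (grid : List String) (min_stars : Int) (out : Option Int × Option String) : Prop := out = find_line_with_stars_alt grid min_stars
instance (grid : List String) (min_stars : Int) (out : Option Int × Option String) : Decidable (Spec_find_line_with_stars grid min_stars out) := by unfold Spec_find_line_with_stars; infer_instance

-- ===== CLAIM (what is proved, stated in full; the proofs are below) =====
def Claim_equal_find_line_with_stars : Prop := ∀ (grid : List String) (min_stars : Int), Dom_find_line_with_stars grid min_stars → Spec_find_line_with_stars grid min_stars (find_line_with_stars grid min_stars)

-- ===== LEMMAS AND PROOFS =====

-- the needle length, as a Nat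
def pvK (ms : Int) : Nat := (max (ms + 1) 1).toNat

theorem pvK_pos (ms : Int) : 1 ≤ pvK ms := by unfold pvK; omega

theorem pvK_gt (ms : Int) : ms < (pvK ms : Int) := by unfold pvK; omega

theorem pv_repl_prefix {j k : Nat} (h : k ≤ j) (a : Char) :
    List.replicate k a <+: List.replicate j a :=
  ⟨List.replicate (j - k) a, by rw [← List.replicate_add]; congr 1; omega⟩

-- characterisation of A's inner loop with an arbitrary nonnegative counter
theorem pvInnerA_iff (ms : Int) (l : List Char) (c : Int) (hc : 0 ≤ c) :
    pvInnerA ms l c = true ↔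
      (∃ j : Nat, 1 ≤ j ∧ List.replicate j '*' <+: l ∧ ms < c + j) ∨
      List.replicate (pvK ms) '*' <:+: l := by
  induction l generalizing c with
  | nil =>
    simp only [pvInnerA]
    constructor
    · intro h; exact absurd h (by simp)
    · rintro (⟨j, hj, hp, _⟩ | hinf)
      · have := hp.length_le; simp at this; omega
      · have := hinf.length_le; have := pvK_pos ms; simp at *; omega
  | cons ch rest ih =>
    by_cases hch : ch = '*'
    · subst hch
      by_cases hgt : c + 1 > ms
      · rw [pvInnerA.eq_def]
        simp only [if_true, if_pos hgt]
        constructor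
        · intro _
          refine Or.inl ⟨1, le_refl 1, ?_, by push_cast; omega⟩
          exact List.cons_prefix_cons.mpr ⟨rfl, List.nil_prefix⟩
        · intro _; trivial
      · rw [pvInnerA.eq_def]
        simp only [if_true, if_neg hgt]
        rw [ih (c + 1) (by omega)]
        constructor
        · rintro (⟨j, hj, hp, hlt⟩ | hinf)
          · refine Or.inl ⟨j + 1, by omega, ?_, by push_cast at *; omega⟩
            rw [List.replicate_succ]
            exact List.cons_prefix_cons.mpr ⟨rfl, hp⟩
          · exact Or.inr (hinf.trans ((List.suffix_cons '*' rest).isInfix))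
        · rintro (⟨j, hj, hp, hlt⟩ | hinf)
          · -- j ≥ 2 since j = 1 would contradict ¬(c+1 > ms)
            obtain ⟨j', rfl⟩ : ∃ j', j = j' + 1 := ⟨j - 1, by omega⟩
            rw [List.replicate_succ, List.cons_prefix_cons] at hp
            rcases Nat.eq_zero_or_pos j' with hz | hpos
            · subst hz; exfalso; push_cast at hlt; omega
            · exact Or.inl ⟨j', hpos, hp.2, by push_cast at *; omega⟩
          · rcases List.infix_cons_iff.mp hinf with hp | ht
            · -- here c+1 ≤ ms and 0 ≤ c force ms ≥ 1, so pvK ms ≥ 2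
              have hK2 : 2 ≤ pvK ms := by unfold pvK; omega
              obtain ⟨j', hj'⟩ : ∃ j', pvK ms = j' + 1 := ⟨pvK ms - 1, by omega⟩
              rw [hj', List.replicate_succ, List.cons_prefix_cons] at hp
              exact Or.inl ⟨j', by omega, hp.2, by have := pvK_gt ms; push_cast at *; omega⟩
            · exact Or.inr ht
    · simp only [pvInnerA, if_neg hch]
      rw [ih 0 le_rfl]
      constructor
      · rintro (⟨j, hj, hp, hlt⟩ | hinf)
        · -- j > ms and j ≥ 1 give pvK ms ≤ j, hence the needle is infix of rest
          have hK : pvK ms ≤ j := by have := pvK_pos ms; unfold pvK at *; omega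
          exact Or.inr (((pv_repl_prefix hK '*').trans hp).isInfix.trans
            (List.suffix_cons ch rest).isInfix)
        · exact Or.inr (hinf.trans (List.suffix_cons ch rest).isInfix)
      · rintro (⟨j, hj, hp, hlt⟩ | hinf)
        · -- a nonempty star run cannot be a prefix of ch::rest when ch ≠ '*'
          exfalso
          obtain ⟨j', rfl⟩ : ∃ j', j = j' + 1 := ⟨j - 1, by omega⟩
          rw [List.replicate_succ, List.cons_prefix_cons] at hp
          exact hch hp.1.symm
        · rcases List.infix_cons_iff.mp hinf with hp | ht
          · exfalso
            have h1 := pvK_pos ms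
            obtain ⟨j', hj'⟩ : ∃ j', pvK ms = j' + 1 := ⟨pvK ms - 1, by omega⟩
            rw [hj', List.replicate_succ, List.cons_prefix_cons] at hp
            exact hch hp.1.symm
          · exact Or.inr ht

-- the two row tests agree
theorem pv_test_eq (ms : Int) (row : String) :
    pvInnerA ms row.toList 0 =
      (decide ((max (ms + 1) 1) ≤ PySem.Str.len row) &&
        PySem.Chars.isIn (PySem.List.pyRepeat ['*'] (max (ms + 1) 1)) row.toList) := by
  have h := pvInnerA_iff ms row.toList 0 le_rfl
  rw [PySem.List.pyRepeat_singleton]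
  rcases hb : PySem.Chars.isIn (List.replicate (max (ms + 1) 1).toNat '*') row.toList with _ | _
  · -- isIn = false: show inner loop is false too
    rcases hA : pvInnerA ms row.toList 0 with _ | _
    · rw [Bool.and_false]
    · exfalso
      rcases h.mp hA with ⟨j, hj, hp, hlt⟩ | hinf
      · have hK : pvK ms ≤ j := by have := pvK_pos ms; unfold pvK at *; omega
        have : List.replicate (pvK ms) '*' <:+: row.toList :=
          ((pv_repl_prefix hK '*').trans hp).isInfix
        rw [(PySem.Chars.isIn_iff_infix _ _).symm] at this
        unfold pvK at this; rw [hb] at this; exact Bool.false_ne_true this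
      · rw [(PySem.Chars.isIn_iff_infix _ _).symm] at hinf
        unfold pvK at hinf; rw [hb] at hinf; exact Bool.false_ne_true hinf
  · -- isIn = true: the needle is infix, so the row is long enough and the inner loop fires
    have hinf := (PySem.Chars.isIn_iff_infix _ _).mp hb
    have hlen : (max (ms + 1) 1) ≤ PySem.Str.len row := by
      have := hinf.length_le
      rw [List.length_replicate] at this
      rw [PySem.Str.len_eq]; omega
    rw [Bool.and_true, decide_eq_true hlen]
    exact h.mpr (Or.inr (by unfold pvK; exact hinf))

-- outer loops agree once the tests agree, for every start index
theorem pv_rows_eq (ms : Int) (grid : List String) (i : Int) :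
    pvRowsA ms i grid = pvRowsB (max (ms + 1) 1) i grid := by
  induction grid generalizing i with
  | nil => rfl
  | cons row rest ih =>
    have ht := pv_test_eq ms row
    cases hd : decide (max (ms + 1) 1 ≤ PySem.Str.len row) <;>
      cases hi : PySem.Chars.isIn (PySem.List.pyRepeat ['*'] (max (ms + 1) 1)) row.toList <;>
      rw [hd, hi] at ht <;>
      simp only [Bool.false_and, Bool.true_and, Bool.and_false, Bool.and_true] at ht <;>
      simp only [pvRowsA, pvRowsB, ht, hd, hi, if_true, if_false, Bool.false_eq_true,
        ite_true, ite_false] <;>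
      first
        | rfl
        | exact ih (i + 1)

-- ===== VERDICT (by name: the statement is the Claim_ definition above) =====
theorem find_line_with_stars_spec : Claim_equal_find_line_with_stars := by
  intro grid ms _
  unfold Spec_find_line_with_stars find_line_with_stars find_line_with_stars_alt
  exact pv_rows_eq ms grid 0
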